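-- pv_equiv track=rewrite | github.com/OneTeraByte7/RAG | server/api/main.py | _collect_legitimacy_features
-- ===== SOURCE A (Python) =====
-- from typing import List, Optional, Dict
--
-- def _collect_legitimacy_features(contexts: List[Dict]) -> Dict[int, List[str]]:
--     features_by_index: Dict[int, List[str]] = {}
--     for idx, ctx in enumerate(contexts):
--         text_blob = " ".join([
--             ctx.get("raw_text", ""),
--             ctx.get("text", "")
--         ]).lower()
--         if not text_blob:
--             continue
--
--         features = []
--         if "secure qr" in text_blob or "offline verification" in text_blob:
--             features.append("mentions Secure QR code verification guidance")
--         if "uidai" in text_blob or "unique identification authority" in text_blob: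
--             features.append("references UIDAI oversight")
--         if "aadhaar" in text_blob:
--             features.append("includes Aadhaar branding")
--         if "proof of identity" in text_blob:
--             features.append("states it is proof of identity")
--
--         if features:
--             features_by_index[idx] = features
--
--     return features_by_index
-- ===== SOURCE B (Python) =====
-- from typing import List, Dict
--
-- _RULES = [
--     (("secure qr", "offline verification"), "mentions Secure QR code verification guidance"),
--     (("uidai", "unique identification authority"), "references UIDAI oversight"),
--     (("aadhaar",), "includes Aadhaar branding"),
--     (("proof of identity",), "states it is proof of identity"),
-- ]
--
-- def _collect_legitimacy_features(contexts: List[Dict]) -> Dict[int, List[str]]: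
--     # Staged passes: first lower-case blobs, then a rule x context matrix of
--     # optional labels (one column per rule), then transpose and collect rows.
--     blobs = [" ".join((c.get("raw_text", ""), c.get("text", ""))).lower()
--              for c in contexts]
--     columns = [[label if any(k in blob for k in kws) else None for blob in blobs]
--                for kws, label in _RULES]
--     result: Dict[int, List[str]] = {}
--     for idx, cells in enumerate(zip(*columns)):
--         feats = [lab for lab in cells if lab is not None]
--         if feats:
--             result[idx] = feats
--     return result
-- ===== Notes on version B (the rewrite author's own statement) =====
-- stated objective: alternative
-- what changed: A makes one pass over contexts with four inline if/append checks; B works in staged passes: it first builds the list of lowercased blobs, then a rule-by-context matrix of optional labels (one column per rule), transposes it with zip(*columns), and finally collects each row's non-None labels into the result dict.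
import Mathlib
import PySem

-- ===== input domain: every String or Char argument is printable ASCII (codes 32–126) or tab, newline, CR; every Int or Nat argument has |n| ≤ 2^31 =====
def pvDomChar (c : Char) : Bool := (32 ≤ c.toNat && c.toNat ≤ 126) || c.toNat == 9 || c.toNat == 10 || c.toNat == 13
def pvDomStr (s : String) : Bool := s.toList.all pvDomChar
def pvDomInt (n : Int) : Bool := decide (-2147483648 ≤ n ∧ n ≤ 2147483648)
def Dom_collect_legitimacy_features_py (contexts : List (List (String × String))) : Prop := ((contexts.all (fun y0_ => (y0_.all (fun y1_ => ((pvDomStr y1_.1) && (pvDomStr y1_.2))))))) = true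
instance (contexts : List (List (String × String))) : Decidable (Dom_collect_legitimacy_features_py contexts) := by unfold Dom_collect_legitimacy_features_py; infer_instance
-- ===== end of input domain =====

-- B replaces A's single pass with four inline ifs by staged passes: a blob list, a
-- rule x context matrix of optional labels, a transpose (zip(*columns)) and a row
-- collection pass (objective: alternative; same asymptotic cost).
-- ===== PORT A =====
-- ctx.get(k, "") on the association list (dict), first match
def pvGetA (ctx : List (String × String)) (k : String) : String :=
  (PySem.Dict.mk ctx).getD k ""

def pvBlobA (ctx : List (String × String)) : String :=
  PySem.Str.lower (PySem.Str.join " " [pvGetA ctx "raw_text", pvGetA ctx "text"])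

def pvStepA (fbi : PySem.Dict Int (List String)) (p : Int × List (String × String)) :
    PySem.Dict Int (List String) :=
  let text_blob := pvBlobA p.2
  if PySem.Str.len text_blob == 0 then fbi
  else
    let features : List String := []
    let features := if PySem.Str.isIn "secure qr" text_blob || PySem.Str.isIn "offline verification" text_blob
      then features ++ ["mentions Secure QR code verification guidance"] else features
    let features := if PySem.Str.isIn "uidai" text_blob || PySem.Str.isIn "unique identification authority" text_blob
      then features ++ ["references UIDAI oversight"] else features
    let features := if PySem.Str.isIn "aadhaar" text_blob
      then features ++ ["includes Aadhaar branding"] else features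
    let features := if PySem.Str.isIn "proof of identity" text_blob
      then features ++ ["states it is proof of identity"] else features
    if features.isEmpty then fbi else fbi.insert p.1 features

def collect_legitimacy_features_py (contexts : List (List (String × String))) : List (Int × List String) :=
  ((PySem.List.enumerate contexts 0).foldl pvStepA PySem.Dict.empty).items

-- ===== PORT B =====
def pvRules : List (List String × String) :=
  [ (["secure qr", "offline verification"], "mentions Secure QR code verification guidance"),
    (["uidai", "unique identification authority"], "references UIDAI oversight"),
    (["aadhaar"], "includes Aadhaar branding"),
    (["proof of identity"], "states it is proof of identity") ]

def pvBlobB (ctx : List (String × String)) : String :=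
  PySem.Str.lower (PySem.Str.join " "
    [(PySem.Dict.mk ctx).getD "raw_text" "", (PySem.Dict.mk ctx).getD "text" ""])

-- hand port of Python's zip(*cols) (no PySem primitive): truncating transpose; exact —
-- zip over k iterators yields rows while every column still has an element
def pvHeads {α : Type} (cols : List (List α)) : Option (List α × List (List α)) :=
  cols.foldr (fun c acc => match c, acc with
    | x :: xs, some (hs, ts) => some (x :: hs, xs :: ts)
    | _, _ => none) (some ([], []))

def pvZipStarAux {α : Type} : List α → List (List α) → List (List α)
  | [], _ => []
  | x :: xs, rest => match pvHeads rest with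
    | none => []
    | some (hs, ts) => (x :: hs) :: pvZipStarAux xs ts

def pvZipStar {α : Type} : List (List α) → List (List α)
  | [] => []
  | c :: cs => pvZipStarAux c cs

def collect_legitimacy_features_py_alt (contexts : List (List (String × String))) : List (Int × List String) :=
  let blobs := contexts.map pvBlobB
  let columns := pvRules.map (fun r =>
    blobs.map (fun blob => if r.1.any (fun k => PySem.Str.isIn k blob) then some r.2 else none))
  ((PySem.List.enumerate (pvZipStar columns) 0).foldl
    (fun result p =>
      let feats := p.2.filterMap (fun lab => lab)
      if feats.isEmpty then result else result.insert p.1 feats)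
    PySem.Dict.empty).items

-- ===== PRECONDITION & SPEC =====
def Spec_collect_legitimacy_features_py (contexts : List (List (String × String))) (out : List (Int × List String)) : Prop := out = collect_legitimacy_features_py_alt contexts
instance (contexts : List (List (String × String))) (out : List (Int × List String)) : Decidable (Spec_collect_legitimacy_features_py contexts out) := by unfold Spec_collect_legitimacy_features_py; infer_instance

-- ===== CLAIM (what is proved, stated in full; the proofs are below) =====
def Claim_equal_collect_legitimacy_features_py : Prop := ∀ (contexts : List (List (String × String))), Dom_collect_legitimacy_features_py contexts → Spec_collect_legitimacy_features_py contexts (collect_legitimacy_features_py contexts)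

-- ===== LEMMAS AND PROOFS =====

-- the blob always contains the joining space, so A's 'if not text_blob: continue' never fires
lemma pvBlobA_len_ne_zero (ctx : List (String × String)) :
    (PySem.Str.len (pvBlobA ctx) == 0) = false := by
  simp [pvBlobA, PySem.Str.len_eq, PySem.Str.toList_lower, PySem.Str.toList_join,
        PySem.Chars.join, PySem.Chars.lower, List.intercalate]
  omega

-- the row B's transpose produces for a blob, and its collected features
def pvRow (b : String) : List (Option String) :=
  [ if PySem.Str.isIn "secure qr" b || PySem.Str.isIn "offline verification" b
      then some "mentions Secure QR code verification guidance" else none,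
    if PySem.Str.isIn "uidai" b || PySem.Str.isIn "unique identification authority" b
      then some "references UIDAI oversight" else none,
    if PySem.Str.isIn "aadhaar" b then some "includes Aadhaar branding" else none,
    if PySem.Str.isIn "proof of identity" b then some "states it is proof of identity" else none ]

def pvFeats (b : String) : List String := (pvRow b).filterMap (fun lab => lab)

-- one step of A's loop = insert of the collected row features
set_option maxHeartbeats 1000000 in
lemma pvStepA_eq (d : PySem.Dict Int (List String)) (p : Int × List (String × String)) :
    pvStepA d p = if (pvFeats (pvBlobA p.2)).isEmpty then d
                  else d.insert p.1 (pvFeats (pvBlobA p.2)) := by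
  cases h1 : PySem.Str.isIn "secure qr" (pvBlobA p.2) <;>
  cases h2 : PySem.Str.isIn "offline verification" (pvBlobA p.2) <;>
  cases h3 : PySem.Str.isIn "uidai" (pvBlobA p.2) <;>
  cases h4 : PySem.Str.isIn "unique identification authority" (pvBlobA p.2) <;>
  cases h5 : PySem.Str.isIn "aadhaar" (pvBlobA p.2) <;>
  cases h6 : PySem.Str.isIn "proof of identity" (pvBlobA p.2) <;>
  simp only [pvStepA, pvFeats, pvRow, pvBlobA_len_ne_zero,
             h1, h2, h3, h4, h5, h6, List.filterMap_cons, List.filterMap_nil,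
             Bool.or_true, Bool.or_false, reduceIte,
             List.isEmpty_cons, List.nil_append, List.cons_append] <;>
  rfl

-- transpose of four columns mapped over the same list is the map of rows
lemma pvZipStar_four {α β : Type} (l : List α) (f1 f2 f3 f4 : α → β) :
    pvZipStar [l.map f1, l.map f2, l.map f3, l.map f4]
      = l.map (fun x => [f1 x, f2 x, f3 x, f4 x]) := by
  induction l with
  | nil => rfl
  | cons x xs ih =>
    simpa [pvZipStar, pvZipStarAux, pvHeads] using ih

-- enumerate commutes with map on the payload
lemma pvEnumerate_map {α β : Type} (f : α → β) (xs : List α) (s : Int) :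
    PySem.List.enumerate (xs.map f) s
      = (PySem.List.enumerate xs s).map (fun p => (p.1, f p.2)) := by
  induction xs generalizing s with
  | nil => simp [PySem.List.enumerate_nil]
  | cons x xs ih => simp [PySem.List.enumerate_cons, ih]

-- a loop inserting fresh, strictly larger keys appends exactly the filtered pairs
lemma pvLoop_items {β : Type} (f : β → List String) (xs : List β) (s : Int)
    (d : PySem.Dict Int (List String)) (h : ∀ k ∈ d.keys, k < s) :
    ((PySem.List.enumerate xs s).foldl
        (fun d p => if (f p.2).isEmpty then d else d.insert p.1 (f p.2)) d).items
      = d.items ++ (PySem.List.enumerate xs s).filterMap (fun p =>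
          if (f p.2).isEmpty then none else some (p.1, f p.2)) := by
  induction xs generalizing s d with
  | nil => simp [PySem.List.enumerate_nil]
  | cons c cs ih =>
    rw [PySem.List.enumerate_cons]
    simp only [List.foldl_cons, List.filterMap_cons]
    by_cases hf : (f c).isEmpty
    · simp only [hf, if_true]
      exact ih (s + 1) d (fun k hk => by have := h k hk; omega)
    · simp only [hf, if_false, Bool.false_eq_true]
      have hnc : d.contains s = false := by
        by_contra hc
        have hmem : s ∈ d.keys := (PySem.Dict.contains_iff_mem_keys d s).1
          (by revert hc; cases d.contains s <;> simp)
        exact absurd (h s hmem) (lt_irrefl s)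
      rw [ih (s + 1) (d.insert s (f c)) (fun k hk => by
        rcases (PySem.Dict.mem_keys_insert d s k (f c)).1 hk with h1 | h1
        · omega
        · have := h k h1; omega)]
      rw [PySem.Dict.items_insert_of_not_contains d (f c) hnc]
      simp

-- Source B builds the blob exactly as A does
lemma pvBlobAB (ctx : List (String × String)) : pvBlobB ctx = pvBlobA ctx := rfl

-- pointwise-equal step functions fold alike
lemma pvFoldl_ext {α β : Type} (f g : β → α → β) (hfg : ∀ b a, f b a = g b a)
    (l : List α) (b : β) : l.foldl f b = l.foldl g b := by
  induction l generalizing b with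
  | nil => rfl
  | cons x xs ih => simp only [List.foldl_cons, hfg, ih]

-- ===== VERDICT (by name: the statement is the Claim_ definition above) =====
set_option maxHeartbeats 1000000 in
theorem collect_legitimacy_features_py_spec : Claim_equal_collect_legitimacy_features_py := by
  intro contexts _
  unfold Spec_collect_legitimacy_features_py collect_legitimacy_features_py collect_legitimacy_features_py_alt
  have hrows : pvZipStar (pvRules.map (fun r =>
      (contexts.map pvBlobB).map (fun blob =>
        if r.1.any (fun k => PySem.Str.isIn k blob) then some r.2 else none)))
      = contexts.map (fun c => pvRow (pvBlobB c)) := by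
    simp only [pvRules, List.map_cons, List.map_nil]
    rw [pvZipStar_four]
    simp [pvRow, List.map_map, Function.comp]
  simp only [hrows]
  rw [pvFoldl_ext pvStepA
        (fun d p => if (pvFeats (pvBlobA p.2)).isEmpty then d
                    else d.insert p.1 (pvFeats (pvBlobA p.2))) pvStepA_eq _ _,
      pvLoop_items (fun c => pvFeats (pvBlobA c)) contexts 0 PySem.Dict.empty
        (by simp [PySem.Dict.keys_empty]),
      pvLoop_items (fun cells => cells.filterMap (fun lab => lab))
        (contexts.map (fun c => pvRow (pvBlobB c))) 0 PySem.Dict.empty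
        (by simp [PySem.Dict.keys_empty]),
      pvEnumerate_map (fun c => pvRow (pvBlobB c)) contexts 0]
  rw [List.filterMap_map]
  refine congrArg (PySem.Dict.empty.items ++ ·) (List.filterMap_congr ?_)
  intro p _
  simp only [Function.comp_def, pvFeats, pvBlobAB]
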